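-- pv_equiv track=rewrite | github.com/kevinshenyang07/Data-Structures-and-Algorithms | algorithms/two_pointers/expressive_words.py | is_expressive
-- ===== SOURCE A (Python) =====
-- def is_expressive(S, W):
--     i = j = 0
--
--     while i < len(S) and j < len(W):
--         if S[i] != W[j]:
--             return False
--
--         char = S[i]
--
--         cnt_S = 0
--         while i < len(S) and S[i] == char:
--             i += 1
--             cnt_S += 1
--
--         cnt_W = 0
--         while j < len(W) and W[j] == char:
--             j += 1
--             cnt_W += 1
--         # one char in W cannot be extended to 2 chars in S
--         # but two same chars in W can be extended to 3+
--         if cnt_S < cnt_W or (cnt_S == 2 and cnt_W == 1):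
--             return False
--
--     return i == len(S) and j == len(W)
-- ===== SOURCE B (Python) =====
-- def _rle(s):
--     # run-length encode s into a list of (char, count) groups
--     groups = []
--     cur = None  # current open group (char, count)
--     for ch in s:
--         if cur is not None and ch == cur[0]:
--             cur = (cur[0], cur[1] + 1)
--         else:
--             if cur is not None:
--                 groups.append(cur)
--             cur = (ch, 1)
--     if cur is not None:
--         groups.append(cur)
--     return groups
--
-- def is_expressive(S, W):
--     gs, gw = _rle(S), _rle(W)
--     if len(gs) != len(gw):
--         return False
--     for (c1, m), (c2, n) in zip(gs, gw):
--         if c1 != c2 or m < n or (m == 2 and n == 1):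
--             return False
--     return True
-- ===== Notes on version B (the rewrite author's own statement) =====
-- stated objective: simpler
-- what changed: Replaces the interleaved two-pointer run-consuming scan with run-length encoding both strings into (char,count) group lists first, then a single aligned comparison of the two group lists.
import Mathlib
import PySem

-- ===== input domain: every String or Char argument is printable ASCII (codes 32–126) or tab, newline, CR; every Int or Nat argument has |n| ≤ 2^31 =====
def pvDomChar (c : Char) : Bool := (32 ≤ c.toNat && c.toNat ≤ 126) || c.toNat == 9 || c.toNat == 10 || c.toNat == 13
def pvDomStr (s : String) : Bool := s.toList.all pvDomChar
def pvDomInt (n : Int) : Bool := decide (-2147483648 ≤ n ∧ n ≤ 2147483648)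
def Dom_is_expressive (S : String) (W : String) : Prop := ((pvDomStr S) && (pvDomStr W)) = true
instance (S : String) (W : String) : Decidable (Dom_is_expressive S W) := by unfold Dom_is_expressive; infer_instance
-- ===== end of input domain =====

-- B is simpler: it run-length encodes both strings into (char,count) groups first,
-- then compares the two aligned group lists, instead of A's interleaved two-pointer scan.

-- ===== PORT A =====
-- A's inner while loops: consume the leading run of `c`, returning (count, rest)
def runA (c : Char) : List Char → Nat × List Char
  | [] => (0, [])
  | x :: xs => if x = c then ((runA c xs).1 + 1, (runA c xs).2) else (0, x :: xs)

theorem runA_snd_length_le (c : Char) (l : List Char) : (runA c l).2.length ≤ l.length := by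
  induction l with
  | nil => simp [runA]
  | cons x xs ih => by_cases h : x = c <;> simp [runA, h] <;> omega

-- A's outer while loop over the two remaining suffixes (positions i, j)
def goA (s w : List Char) : Bool :=
  match s, w with
  | a :: s', b :: w' =>
    if a ≠ b then false
    else if (runA a (a :: s')).1 < (runA a (b :: w')).1
        || ((runA a (a :: s')).1 == 2 && (runA a (b :: w')).1 == 1) then false
    else goA (runA a (a :: s')).2 (runA a (b :: w')).2
  | s, w => s.isEmpty && w.isEmpty
termination_by s.length
decreasing_by
  simp only [runA, if_pos rfl]
  have := runA_snd_length_le a s'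
  simpa using Nat.lt_succ_of_le this

def is_expressive (S : String) (W : String) : Bool := goA S.toList W.toList

-- ===== PORT B =====
-- Source B's _rle: one pass keeping the finished groups and the current open group
def rleStep (st : List (Char × Nat) × Option (Char × Nat)) (ch : Char) :
    List (Char × Nat) × Option (Char × Nat) :=
  match st.2 with
  | some pc =>
    if ch = pc.1 then (st.1, some (pc.1, pc.2 + 1))
    else (st.1 ++ [pc], some (ch, 1))
  | none => (st.1, some (ch, 1))

def rleF (l : List Char) : List (Char × Nat) :=
  let st := l.foldl rleStep ([], none)
  match st.2 with
  | some g => st.1 ++ [g]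
  | none => st.1

def is_expressive_alt (S : String) (W : String) : Bool :=
  let gs := rleF S.toList
  let gw := rleF W.toList
  if gs.length ≠ gw.length then false
  else (gs.zip gw).all fun p =>
    !((p.1.1 != p.2.1) || decide (p.1.2 < p.2.2) || (p.1.2 == 2 && p.2.2 == 1))

-- ===== PRECONDITION & SPEC =====
def Spec_is_expressive (S : String) (W : String) (out : Bool) : Prop := out = is_expressive_alt S W
instance (S : String) (W : String) (out : Bool) : Decidable (Spec_is_expressive S W out) := by unfold Spec_is_expressive; infer_instance

-- ===== CLAIM (what is proved, stated in full; the proofs are below) =====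
def Claim_equal_is_expressive : Prop := ∀ (S : String) (W : String), Dom_is_expressive S W → Spec_is_expressive S W (is_expressive S W)

-- ===== LEMMAS AND PROOFS =====

-- proof-side recursive run-length encoding (reference form of rleF)
def rleR : List Char → List (Char × Nat)
  | [] => []
  | c :: rest =>
    match rleR rest with
    | (d, n) :: t => if c = d then (d, n + 1) :: t else (c, 1) :: (d, n) :: t
    | [] => [(c, 1)]

theorem rleR_cons_def (c : Char) (l : List Char) :
    rleR (c :: l) = match rleR l with
      | (d, n) :: t => if c = d then (d, n + 1) :: t else (c, 1) :: (d, n) :: t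
      | [] => [(c, 1)] := rfl

theorem rleR_cons_run (c : Char) (l : List Char) :
    rleR (c :: l) = (c, (runA c l).1 + 1) :: rleR (runA c l).2 := by
  induction l generalizing c with
  | nil => simp [rleR, runA]
  | cons x xs ih =>
    by_cases h : x = c
    · subst h
      rw [rleR_cons_def x (x :: xs), ih x]
      simp [runA, ih x]
    · rw [rleR_cons_def c (x :: xs), ih x]
      have hcx : ¬ c = x := fun hc => h hc.symm
      simp [runA, h, hcx, ih x]

theorem rleR_cons_ne_nil (c : Char) (l : List Char) : rleR (c :: l) ≠ [] := by
  rw [rleR_cons_run]; simp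

-- the finished-groups prefix factors out of the fold
def finishF (st : List (Char × Nat) × Option (Char × Nat)) (l : List Char) : List (Char × Nat) :=
  match (l.foldl rleStep st).2 with
  | some g => (l.foldl rleStep st).1 ++ [g]
  | none => (l.foldl rleStep st).1

theorem finishF_step (st : List (Char × Nat) × Option (Char × Nat)) (x : Char) (xs : List Char) :
    finishF st (x :: xs) = finishF (rleStep st x) xs := rfl

theorem finishF_prefix (l : List Char) :
    ∀ (gs : List (Char × Nat)) (cur : Option (Char × Nat)),
    finishF (gs, cur) l = gs ++ finishF ([], cur) l := by
  induction l with
  | nil => intro gs cur; cases cur <;> simp [finishF]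
  | cons x xs ih =>
    intro gs cur
    cases cur with
    | none =>
      rw [finishF_step, finishF_step]
      show finishF (gs, some (x, 1)) xs = gs ++ finishF ([], some (x, 1)) xs
      exact ih gs _
    | some pc =>
      by_cases h : x = pc.1
      · have r1 : rleStep (gs, some pc) x = (gs, some (pc.1, pc.2 + 1)) := by
          simp [rleStep, h]
        have r2 : rleStep (([] : List (Char × Nat)), some pc) x = ([], some (pc.1, pc.2 + 1)) := by
          simp [rleStep, h]
        rw [finishF_step, finishF_step, r1, r2]
        exact ih gs _
      · have r1 : rleStep (gs, some pc) x = (gs ++ [pc], some (x, 1)) := by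
          simp [rleStep, h]
        have r2 : rleStep (([] : List (Char × Nat)), some pc) x = ([pc], some (x, 1)) := by
          simp [rleStep, h]
        rw [finishF_step, finishF_step, r1, r2, ih (gs ++ [pc]) _, ih [pc] _]
        simp

-- opening a fresh group on x and folding the rest gives exactly rleR (x :: xs)
theorem finishF_open_one_aux (x : Char) (xs : List Char) :
    (match rleR xs with
      | (q, n) :: t => if q = x then (x, 1 + n) :: t else (x, 1) :: rleR xs
      | [] => [(x, 1)]) = rleR (x :: xs) := by
  rw [rleR_cons_def]
  rcases hq : rleR xs with _ | ⟨⟨d, n⟩, t⟩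
  · rfl
  · by_cases h : d = x
    · subst h
      simp [Nat.add_comm]
    · have hxd : ¬ x = d := fun hc => h hc.symm
      simp [h, hxd, hq]

theorem finishF_open (l : List Char) :
    ∀ (p : Char) (c : Nat),
    finishF ([], some (p, c)) l =
      match rleR l with
      | (q, n) :: t => if q = p then (p, c + n) :: t else (p, c) :: rleR l
      | [] => [(p, c)] := by
  induction l with
  | nil => intro p c; simp [finishF, rleR]
  | cons x xs ih =>
    intro p c
    by_cases h : x = p
    · subst h
      have r : rleStep (([] : List (Char × Nat)), some (x, c)) x = ([], some (x, c + 1)) := by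
        simp [rleStep]
      rw [finishF_step, r, ih x (c + 1), rleR_cons_def]
      rcases hq : rleR xs with _ | ⟨⟨d, n⟩, t⟩
      · simp
      · by_cases hd : d = x
        · subst hd
          simp only [if_pos rfl]
          have : c + 1 + n = c + (n + 1) := by omega
          rw [this]
          simp
        · have hxd : ¬ x = d := fun hc => hd hc.symm
          simp [hd, hxd, hq]
    · have r : rleStep (([] : List (Char × Nat)), some (p, c)) x = ([(p, c)], some (x, 1)) := by
        simp [rleStep, h]
      rw [finishF_step, r, finishF_prefix xs [(p, c)] (some (x, 1)), ih x 1,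
        finishF_open_one_aux x xs]
      rw [rleR_cons_run x xs]
      have hxp : ¬ x = p := h
      simp [hxp, rleR_cons_run x xs]

theorem rleF_eq_rleR (l : List Char) : rleF l = rleR l := by
  cases l with
  | nil => simp [rleF, rleR]
  | cons x xs =>
    show finishF ([], none) (x :: xs) = _
    rw [finishF_step]
    show finishF ([], some (x, 1)) xs = _
    rw [finishF_open xs x 1, finishF_open_one_aux x xs]

-- the group-list comparison B performs
def chk (gs gw : List (Char × Nat)) : Bool :=
  if gs.length ≠ gw.length then false
  else (gs.zip gw).all fun p =>
    !((p.1.1 != p.2.1) || decide (p.1.2 < p.2.2) || (p.1.2 == 2 && p.2.2 == 1))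

theorem goA_eq_chk (s w : List Char) : goA s w = chk (rleR s) (rleR w) := by
  induction s, w using goA.induct with
  | case1 a s' b w' hne =>
    rw [goA]
    simp only [if_pos hne]
    rw [chk, rleR_cons_run a s', rleR_cons_run b w']
    have hab : (a != b) = true := by simpa using hne
    simp [hab]
  | case2 a s' b w' hne hcond =>
    rw [goA]
    simp only [if_neg hne, if_pos hcond]
    have hab : a = b := by simpa using hne
    subst hab
    simp only [Bool.or_eq_true, decide_eq_true_eq, Bool.and_eq_true, beq_iff_eq] at hcond
    simp only [runA, eq_self_iff_true, if_true] at hcond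
    rw [chk, rleR_cons_run a s', rleR_cons_run a w']
    rcases hcond with h | ⟨h2, h1⟩
    · have hlt : (runA a s').1 + 1 < (runA a w').1 + 1 := by omega
      simp [hlt]
    · have h2' : (runA a s').1 = 1 := by omega
      have h1' : (runA a w').1 = 0 := by omega
      simp [h2', h1']
  | case3 a s' b w' hne hcond ih =>
    rw [goA]
    simp only [if_neg hne, if_neg hcond]
    have hab : a = b := by simpa using hne
    subst hab
    simp only [Bool.or_eq_true, decide_eq_true_eq, Bool.and_eq_true, beq_iff_eq,
      not_or, not_lt, not_and] at hcond
    simp only [runA, eq_self_iff_true, if_true] at hcond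
    obtain ⟨hle, h21⟩ := hcond
    rw [ih, chk, chk, rleR_cons_run a s', rleR_cons_run a w']
    simp only [runA, eq_self_iff_true, if_true] at *
    have hnl : ¬((runA a s').1 + 1 < (runA a w').1 + 1) := by omega
    have hand : (((runA a s').1 + 1 == 2) && ((runA a w').1 + 1 == 1)) = false := by
      by_cases hc : (runA a s').1 + 1 = 2
      · have h1 := h21 (by omega)
        simp only [Bool.and_eq_false_iff, beq_eq_false_iff_ne, ne_eq]
        right
        omega
      · simp only [Bool.and_eq_false_iff, beq_eq_false_iff_ne, ne_eq]
        left
        omega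
    have hor : ((!((runA a s').1 == 1)) || (!((runA a w').1 == 0))) = true := by
      simp only [Bool.or_eq_true, Bool.not_eq_true', beq_eq_false_iff_ne, ne_eq]
      by_cases hc : (runA a s').1 = 1
      · right
        have := h21 (by omega)
        omega
      · left
        exact hc
    simp [hnl, hand, hor]
  | case4 s w hmatch =>
    rcases s with _ | ⟨a, s'⟩ <;> rcases w with _ | ⟨b, w'⟩
    · simp [goA, chk, rleR]
    · rcases hg : rleR (b :: w') with _ | ⟨g, t⟩
      · exact absurd hg (rleR_cons_ne_nil b w')
      · simp only [goA, chk, hg]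
        simp [rleR]
    · rcases hg : rleR (a :: s') with _ | ⟨g, t⟩
      · exact absurd hg (rleR_cons_ne_nil a s')
      · simp only [goA, chk, hg]
        simp [rleR]
    · exact (hmatch a s' b w' rfl rfl).elim

-- ===== VERDICT (by name: the statement is the Claim_ definition above) =====
theorem is_expressive_spec : Claim_equal_is_expressive := by
  intro S W _
  show is_expressive S W = is_expressive_alt S W
  rw [is_expressive, goA_eq_chk, is_expressive_alt]
  simp only [rleF_eq_rleR]
  rfl
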